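-- pv_equiv track=rewrite | github.com/elleuchbrahimkhalil/aierplanggraph | .history/ai_assistant/langgraph_skeleton_20260422092744.py | _apply_select_rows
-- ===== SOURCE A (Python) =====
-- from typing import Any, Dict, List, Optional, TypedDict
--
-- def _apply_select_rows(rows: List[Dict[str, Any]], columns: List[str]) -> List[Dict[str, Any]]:
--     valid_columns = [column for column in columns if isinstance(column, str) and column]
--     if not valid_columns:
--         return rows
--     selected_rows: List[Dict[str, Any]] = []
--     for row in rows:
--         selected = {column: row[column] for column in valid_columns if column in row}
--         if "_endpoint" in row:
--             selected["_endpoint"] = row["_endpoint"]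
--         selected_rows.append(selected)
--     return selected_rows
-- ===== SOURCE B (Python) =====
-- def _apply_select_rows(rows, columns):
--     # Build once: first-occurrence rank of each valid (non-empty string) column.
--     order = {}
--     for column in columns:
--         if isinstance(column, str) and column and column not in order:
--             order[column] = len(order)
--     if not order:
--         return rows
--     last = len(order)
--     result = []
--     for row in rows:
--         picked = [pair for pair in row.items()
--                   if pair[0] in order or pair[0] == "_endpoint"]
--         picked.sort(key=lambda pair: order.get(pair[0], last))
--         result.append(dict(picked))
--     return result
-- ===== Notes on version B (the rewrite author's own statement) =====
-- stated objective: faster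
-- what changed: B builds a first-occurrence rank table of the valid columns once, then per row filters the row's own items by that table and stable-sorts them by rank, instead of A's per-row loop over the whole column list probing the row plus a separate _endpoint copy step.
import Mathlib
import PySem

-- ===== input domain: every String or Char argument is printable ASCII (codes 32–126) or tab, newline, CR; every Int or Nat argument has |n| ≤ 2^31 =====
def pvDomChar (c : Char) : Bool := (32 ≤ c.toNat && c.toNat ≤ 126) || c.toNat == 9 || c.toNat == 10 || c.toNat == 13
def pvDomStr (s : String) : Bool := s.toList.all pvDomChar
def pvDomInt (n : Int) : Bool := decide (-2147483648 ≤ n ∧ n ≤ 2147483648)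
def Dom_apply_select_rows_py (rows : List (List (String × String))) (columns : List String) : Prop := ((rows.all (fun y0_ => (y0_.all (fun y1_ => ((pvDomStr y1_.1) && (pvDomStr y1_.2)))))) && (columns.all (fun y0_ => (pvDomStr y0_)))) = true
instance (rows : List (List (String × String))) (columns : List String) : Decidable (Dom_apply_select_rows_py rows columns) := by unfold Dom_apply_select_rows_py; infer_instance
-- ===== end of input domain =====

-- B replaces A's per-row loop over the whole column list (probe row, then copy "_endpoint")
-- by a rank table built once from the columns plus per-row filtering of the row's own items
-- and a stable sort by rank (objective: faster; measured faster in a timing run).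


-- Shared dict primitives on association lists (a Python dict with unique keys):
-- first-match membership / lookup, and insert-with-overwrite-in-place (Python d[k] = v).
def rcontains (row : List (String × String)) (k : String) : Bool :=
  row.any (fun p => p.1 == k)

def rget (row : List (String × String)) (k : String) : String :=
  match row.find? (fun p => p.1 == k) with
  | some p => p.2
  | none => ""

def dinsert (d : List (String × String)) (k : String) (v : String) : List (String × String) :=
  if d.any (fun p => p.1 == k) then d.map (fun p => if p.1 == k then (k, v) else p)
  else d ++ [(k, v)]

-- ===== PORT A =====
def apply_select_rows_py (rows : List (List (String × String))) (columns : List String) : List (List (String × String)) :=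
  let valid_columns := columns.filter (fun c => c != "")
  if valid_columns = [] then rows
  else
    rows.map (fun row =>
      let selected := valid_columns.foldl
        (fun acc column => if rcontains row column then dinsert acc column (rget row column) else acc) []
      if rcontains row "_endpoint" then dinsert selected "_endpoint" (rget row "_endpoint")
      else selected)

-- ===== PORT B =====
-- order : first-occurrence rank table of the valid columns (a dict column ↦ len(order)).
def pvBStep (ord : List (String × Nat)) (c : String) : List (String × Nat) :=
  if (c != "") && !(ord.any (fun p => p.1 == c)) then ord ++ [(c, ord.length)] else ord

-- order.get(k, last) with last = len(order)
def pvRank (ord : List (String × Nat)) (k : String) : Nat :=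
  match ord.find? (fun p => p.1 == k) with
  | some p => p.2
  | none => ord.length

def apply_select_rows_py_alt (rows : List (List (String × String))) (columns : List String) : List (List (String × String)) :=
  let ord := columns.foldl pvBStep []
  if ord = [] then rows
  else
    rows.map (fun row =>
      let picked := row.filter (fun pr => ord.any (fun p => p.1 == pr.1) || pr.1 == "_endpoint")
      (PySem.List.sorted picked (fun pr => pvRank ord pr.1) false).foldl
        (fun d pr => dinsert d pr.1 pr.2) [])

-- ===== PRECONDITION & SPEC =====
-- Pre_ excludes rows whose association list carries a duplicate key: a Python dict cannot
-- hold duplicate keys, so such Lean inputs represent no Python input and first-match vs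
-- item-iteration semantics diverge on them.
def Pre_apply_select_rows_py (rows : List (List (String × String))) (columns : List String) : Prop :=
  ∀ row ∈ rows, (row.map Prod.fst).Nodup
instance (rows : List (List (String × String))) (columns : List String) : Decidable (Pre_apply_select_rows_py rows columns) := by unfold Pre_apply_select_rows_py; infer_instance

def pvWitness_apply_select_rows_py : (List (List (String × String))) × List String :=
  ([[("a", "1"), ("b", "2")], [("b", "3"), ("_endpoint", "/x")]], ["b", "a"])

def Spec_apply_select_rows_py (rows : List (List (String × String))) (columns : List String) (out : List (List (String × String))) : Prop := out = apply_select_rows_py_alt rows columns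
instance (rows : List (List (String × String))) (columns : List String) (out : List (List (String × String))) : Decidable (Spec_apply_select_rows_py rows columns out) := by unfold Spec_apply_select_rows_py; infer_instance

-- ===== CLAIM (what is proved, stated in full; the proofs are below) =====
def Claim_equal_apply_select_rows_py : Prop := ∀ (rows : List (List (String × String))) (columns : List String), Dom_apply_select_rows_py rows columns → Pre_apply_select_rows_py rows columns → Spec_apply_select_rows_py rows columns (apply_select_rows_py rows columns)

-- ===== LEMMAS AND PROOFS =====

-- proof-side spec functions
def addstep (d : List String) (c : String) : List String :=
  if c ∈ d then d else d ++ [c]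

def ordOf (d : List String) (n : Nat) : List (String × Nat) :=
  match d with
  | [] => []
  | c :: t => (c, n) :: ordOf t (n + 1)

def sel (row : List (String × String)) (ks : List String) : List (String × String) :=
  ks.filterMap (fun k => (row.find? (fun q => q.1 == k)).map (fun q => (k, q.2)))

theorem ordOf_length (d : List String) (n : Nat) : (ordOf d n).length = d.length := by
  induction d generalizing n with
  | nil => rfl
  | cons c t ih => simp [ordOf, ih]

theorem ordOf_append (d e : List String) (n : Nat) :
    ordOf (d ++ e) n = ordOf d n ++ ordOf e (n + d.length) := by
  induction d generalizing n with
  | nil => simp [ordOf]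
  | cons c t ih => simp [ordOf, ih, Nat.add_assoc, Nat.add_comm 1]

theorem ordOf_any (d : List String) (n : Nat) (c : String) :
    (ordOf d n).any (fun p => p.1 == c) = d.any (fun x => x == c) := by
  induction d generalizing n with
  | nil => rfl
  | cons a t ih => simp [ordOf, ih]

theorem ordOf_eq_nil_iff (d : List String) : ordOf d 0 = [] ↔ d = [] := by
  cases d <;> simp [ordOf]

theorem fold_bstep (cs : List String) (d : List String) :
    cs.foldl pvBStep (ordOf d 0) = ordOf (cs.foldl (fun d c => if c ≠ "" ∧ c ∉ d then d ++ [c] else d) d) 0 := by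
  induction cs generalizing d with
  | nil => rfl
  | cons c cs ih =>
    have hstep : pvBStep (ordOf d 0) c =
        ordOf (if c ≠ "" ∧ c ∉ d then d ++ [c] else d) 0 := by
      by_cases h : c ≠ "" ∧ c ∉ d
      · have h1 : (c != "") = true := by simp [h.1]
        have h2 : (ordOf d 0).any (fun p => p.1 == c) = false := by
          rw [ordOf_any]; simp; intro x hx hxc; exact h.2 (hxc ▸ hx)
        simp only [pvBStep, h1, h2, if_pos h, Bool.not_false, Bool.and_true,
          ordOf_append, ordOf_length]
        simp [ordOf]
      · rw [if_neg h]
        rw [not_and_or, not_not] at h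
        by_cases hc : c = ""
        · simp [pvBStep, hc]
        · have hmem : c ∈ d := by
            rcases h with h | h
            · exact absurd h hc
            · exact not_not.mp h
          have h2 : (ordOf d 0).any (fun p => p.1 == c) = true := by
            rw [ordOf_any]; simp; exact hmem
          simp [pvBStep, h2]
    simp only [List.foldl_cons, hstep, ih]

theorem fold_vstep_filter (cs : List String) (d : List String) :
    cs.foldl (fun d c => if c ≠ "" ∧ c ∉ d then d ++ [c] else d) d
      = (cs.filter (fun c => c != "")).foldl addstep d := by
  induction cs generalizing d with
  | nil => rfl
  | cons c cs ih =>
    by_cases hc : c = ""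
    · subst hc
      simp only [List.foldl_cons, List.filter_cons]
      norm_num [ih]
    · have hcb : (c != "") = true := by simp [hc]
      simp only [List.foldl_cons, List.filter_cons, hcb, if_pos, List.foldl_cons]
      rw [← ih]
      congr 1
      by_cases hm : c ∈ d
      · simp [addstep, hm, hc]
      · simp [addstep, hm, hc]

theorem mem_fold_add (cs : List String) (d : List String) (k : String) :
    k ∈ cs.foldl addstep d ↔ k ∈ d ∨ k ∈ cs := by
  induction cs generalizing d with
  | nil => simp
  | cons c cs ih =>
    simp only [List.foldl_cons, ih, List.mem_cons]
    by_cases hm : c ∈ d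
    · simp [addstep, hm]
      constructor
      · tauto
      · rintro (h | h | h) <;> [tauto; (subst h; tauto); tauto]
    · simp [addstep, hm]
      tauto

theorem nodup_fold_add (cs : List String) (d : List String) (hd : d.Nodup) :
    (cs.foldl addstep d).Nodup := by
  induction cs generalizing d with
  | nil => exact hd
  | cons c cs ih =>
    apply ih
    by_cases hm : c ∈ d
    · simpa [addstep, hm] using hd
    · simp only [addstep, if_neg hm]
      rw [List.nodup_append]
      exact ⟨hd, List.nodup_singleton c, fun a ha b hb => by
        simp only [List.mem_singleton] at hb
        subst hb; intro he; exact hm (he ▸ ha)⟩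

theorem mem_sel (row : List (String × String)) (ks : List String) (p : String × String) :
    p ∈ sel row ks ↔ p.1 ∈ ks ∧ ∃ q, row.find? (fun q => q.1 == p.1) = some q ∧ q.2 = p.2 := by
  simp only [sel, List.mem_filterMap, Option.map_eq_some_iff]
  constructor
  · rintro ⟨k, hk, q, hq, hp⟩
    cases p
    cases hp
    exact ⟨hk, q, hq, rfl⟩
  · rintro ⟨hk, q, hq, hv⟩
    exact ⟨p.1, hk, q, hq, by cases p; cases hv; rfl⟩

theorem dinsert_eq_self (l : List (String × String)) (k : String) (v : String)
    (hc : l.any (fun p => p.1 == k) = true) (hv : ∀ p ∈ l, p.1 = k → p.2 = v) :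
    dinsert l k v = l := by
  simp only [dinsert, hc, if_pos]
  conv_rhs => rw [← List.map_id l]
  apply List.map_congr_left
  intro p hp
  obtain ⟨p1, p2⟩ := p
  by_cases hk : p1 = k
  · have hv2 : p2 = v := hv (p1, p2) hp hk
    simp [hk, hv2]
  · simp [hk]

theorem dinsert_append (l : List (String × String)) (k : String) (v : String)
    (hc : l.any (fun p => p.1 == k) = false) :
    dinsert l k v = l ++ [(k, v)] := by
  simp [dinsert, hc]

theorem rcontains_find? (row : List (String × String)) (c : String) :
    rcontains row c = true ↔ ∃ q, row.find? (fun p => p.1 == c) = some q := by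
  simp only [rcontains, List.any_eq_true, ← List.find?_isSome, Option.isSome_iff_exists]

theorem step_sel (row : List (String × String)) (d : List String) (c : String) :
    (if rcontains row c then dinsert (sel row d) c (rget row c) else sel row d)
      = sel row (addstep d c) := by
  by_cases hrc : rcontains row c = true
  · rcases (rcontains_find? row c).mp hrc with ⟨q, hq⟩
    have hrget : rget row c = q.2 := by simp [rget, hq]
    by_cases hm : c ∈ d
    · -- already selected with the same value: insert is a no-op
      have hany : (sel row d).any (fun p => p.1 == c) = true := by
        simp only [List.any_eq_true]
        refine ⟨(c, q.2), ?_, by simp⟩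
        exact (mem_sel row d (c, q.2)).mpr ⟨hm, q, hq, rfl⟩
      have hval : ∀ p ∈ sel row d, p.1 = c → p.2 = q.2 := by
        intro p hp hpc
        rcases (mem_sel row d p).mp hp with ⟨_, q', hq', hv'⟩
        rw [hpc] at hq'
        rw [hq] at hq'
        cases hq'
        exact hv'.symm
      simp [hrc, hrget, dinsert_eq_self _ _ _ hany hval, addstep, hm]
    · have hany : (sel row d).any (fun p => p.1 == c) = false := by
        simp only [List.any_eq_false]
        intro p hp
        rcases (mem_sel row d p).mp hp with ⟨hpd, _⟩
        simp
        intro hpc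
        exact hm (hpc ▸ hpd)
      rw [if_pos hrc, hrget, dinsert_append _ _ _ hany]
      simp [addstep, hm, sel, hq]
  · have hnone : row.find? (fun p => p.1 == c) = none := by
      cases hfind : row.find? (fun p => p.1 == c) with
      | none => rfl
      | some q => exact absurd ((rcontains_find? row c).mpr ⟨q, hfind⟩) hrc
    rw [if_neg hrc]
    by_cases hm : c ∈ d
    · simp [addstep, hm]
    · simp [addstep, hm, sel, hnone]

theorem foldA_sel (row : List (String × String)) (cs : List String) (d : List String) :
    cs.foldl (fun acc c => if rcontains row c then dinsert acc c (rget row c) else acc) (sel row d)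
      = sel row (cs.foldl addstep d) := by
  induction cs generalizing d with
  | nil => rfl
  | cons c cs ih => simp only [List.foldl_cons, step_sel, ih]

theorem find?_of_mem_nodup (row : List (String × String)) (p : String × String)
    (hrow : (row.map Prod.fst).Nodup) (hp : p ∈ row) :
    row.find? (fun q => q.1 == p.1) = some p := by
  induction row with
  | nil => simp at hp
  | cons a row ih =>
    simp only [List.map_cons, List.nodup_cons] at hrow
    rcases List.mem_cons.mp hp with h | h
    · subst h; simp [List.find?_cons_of_pos]
    · have hne : a.1 ≠ p.1 := by
        intro he
        exact hrow.1 (he ▸ (List.mem_map.mpr ⟨p, h, rfl⟩))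
      rw [List.find?_cons_of_neg (by simp [hne]), ih hrow.2 h]

theorem sel_keys_nodup (row : List (String × String)) (ks : List String) (hk : ks.Nodup) :
    ((sel row ks).map Prod.fst).Nodup := by
  induction ks with
  | nil => simp [sel]
  | cons k ks ih =>
    simp only [List.nodup_cons] at hk
    have hsub : ∀ p ∈ sel row ks, p.1 ∈ ks := fun p hp => ((mem_sel row ks p).mp hp).1
    simp only [sel, List.filterMap_cons]
    cases hfind : row.find? (fun q => q.1 == k) with
    | none => exact ih hk.2
    | some q =>
      simp only [Option.map_some, List.map_cons, List.nodup_cons]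
      refine ⟨?_, ih hk.2⟩
      simp only [List.mem_map]
      rintro ⟨p, hp, hpk⟩
      exact hk.1 (hpk ▸ hsub p hp)

theorem find?_ordOf_idx (d : List String) (hd : d.Nodup) (n i : Nat) (h : i < d.length) :
    (ordOf d n).find? (fun p => p.1 == d[i]) = some (d[i], n + i) := by
  induction d generalizing n i with
  | nil => simp at h
  | cons a t ih =>
    simp only [List.nodup_cons] at hd
    cases i with
    | zero => simp [ordOf, List.find?_cons_of_pos]
    | succ j =>
      have hj : j < t.length := by simpa using h
      have hne : a ≠ t[j] := by
        intro he
        exact hd.1 (he ▸ t.getElem_mem hj)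
      have : (a :: t)[j + 1] = t[j] := by simp
      rw [this]
      simp only [ordOf]
      rw [List.find?_cons_of_neg (by simp [hne]), ih hd.2 (n + 1) j hj]
      simp; omega

theorem find?_ordOf_none (d : List String) (c : String) (hc : c ∉ d) (n : Nat) :
    (ordOf d n).find? (fun p => p.1 == c) = none := by
  induction d generalizing n with
  | nil => rfl
  | cons a t ih =>
    simp only [List.mem_cons, not_or] at hc
    simp only [ordOf]
    rw [List.find?_cons_of_neg (by simp; exact fun he => hc.1 he.symm), ih hc.2]

theorem rank_idx (d : List String) (hd : d.Nodup) (i : Nat) (h : i < d.length) :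
    pvRank (ordOf d 0) d[i] = i := by
  simp [pvRank, find?_ordOf_idx d hd 0 i h]

theorem rank_not_mem (d : List String) (c : String) (hc : c ∉ d) :
    pvRank (ordOf d 0) c = d.length := by
  simp [pvRank, find?_ordOf_none d c hc 0, ordOf_length]

theorem pairwise_rank (d : List String) (hd : d.Nodup) :
    d.Pairwise (fun a b => pvRank (ordOf d 0) a < pvRank (ordOf d 0) b) := by
  rw [List.pairwise_iff_getElem]
  intro i j hi hj hij
  rw [rank_idx d hd i hi, rank_idx d hd j hj]; exact hij

theorem rank_lt_of_mem (d : List String) (hd : d.Nodup) (a : String) (ha : a ∈ d) :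
    pvRank (ordOf d 0) a < d.length := by
  rcases List.mem_iff_getElem.mp ha with ⟨i, hi, rfl⟩
  rw [rank_idx d hd i hi]; exact hi

theorem tmpl_pairwise (d : List String) (hd : d.Nodup) :
    (addstep d "_endpoint").Pairwise (fun a b => pvRank (ordOf d 0) a < pvRank (ordOf d 0) b) := by
  by_cases hm : "_endpoint" ∈ d
  · simpa only [addstep, if_pos hm] using pairwise_rank d hd
  · simp only [addstep, if_neg hm]
    rw [List.pairwise_append]
    refine ⟨pairwise_rank d hd, List.pairwise_singleton _ _, ?_⟩
    intro a ha b hb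
    simp only [List.mem_singleton] at hb
    subst hb
    rw [rank_not_mem d _ hm]
    exact rank_lt_of_mem d hd a ha

theorem sel_pairwise (row : List (String × String)) (ks : List String)
    (R : String → String → Prop) (h : ks.Pairwise R) :
    (sel row ks).Pairwise (fun p q => R p.1 q.1) := by
  induction ks with
  | nil => simp [sel]
  | cons k ks ih =>
    rcases List.pairwise_cons.mp h with ⟨hk, ht⟩
    simp only [sel, List.filterMap_cons]
    cases hfind : row.find? (fun q => q.1 == k) with
    | none => exact ih ht
    | some q =>
      simp only [Option.map_some, List.pairwise_cons]
      refine ⟨?_, ih ht⟩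
      intro p hp
      exact hk p.1 ((mem_sel row ks p).mp hp).1

theorem foldl_dinsert (l acc : List (String × String))
    (hdisj : ∀ p ∈ l, acc.any (fun q => q.1 == p.1) = false)
    (hnd : (l.map Prod.fst).Nodup) :
    l.foldl (fun d pr => dinsert d pr.1 pr.2) acc = acc ++ l := by
  induction l generalizing acc with
  | nil => simp
  | cons p l ih =>
    simp only [List.map_cons, List.nodup_cons] at hnd
    have hp : acc.any (fun q => q.1 == p.1) = false := hdisj p (List.mem_cons_self)
    simp only [List.foldl_cons, dinsert_append _ _ _ hp]
    rw [ih (acc ++ [(p.1, p.2)])]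
    · simp
    · intro r hr
      simp only [List.any_append, Bool.or_eq_false_iff]
      refine ⟨hdisj r (List.mem_cons_of_mem _ hr), ?_⟩
      simp only [List.any_cons, List.any_nil, Bool.or_false]
      simp only [beq_eq_false_iff_ne, ne_eq]
      intro he
      exact hnd.1 (he ▸ List.mem_map.mpr ⟨r, hr, rfl⟩)
    · exact hnd.2

-- per-row equality, with D the deduplicated valid-column list
theorem perrow (row : List (String × String)) (D : List String)
    (hrow : (row.map Prod.fst).Nodup) (hD : D.Nodup) :
    (if rcontains row "_endpoint" then
        dinsert (sel row D) "_endpoint" (rget row "_endpoint")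
      else sel row D)
      = (PySem.List.sorted
          (row.filter (fun pr => (ordOf D 0).any (fun p => p.1 == pr.1) || pr.1 == "_endpoint"))
          (fun pr => pvRank (ordOf D 0) pr.1) false).foldl
          (fun d pr => dinsert d pr.1 pr.2) [] := by
  have htmplnd : (addstep D "_endpoint").Nodup := by
    by_cases hm : "_endpoint" ∈ D
    · simpa [addstep, hm] using hD
    · simp only [addstep, if_neg hm]
      rw [List.nodup_append]
      exact ⟨hD, List.nodup_singleton _, fun a ha b hb => by
        simp only [List.mem_singleton] at hb
        subst hb; intro he; exact hm (he ▸ ha)⟩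
  -- LHS = sel row (addstep D "_endpoint")
  rw [step_sel row D "_endpoint"]
  -- RHS: the sorted filtered row is exactly sel row (addstep D "_endpoint")
  have hperm : (sel row (addstep D "_endpoint")).Perm
      (row.filter (fun pr => (ordOf D 0).any (fun p => p.1 == pr.1) || pr.1 == "_endpoint")) := by
    have hrownd : row.Nodup := hrow.of_map
    refine (List.perm_ext_iff_of_nodup ?_ ?_).mpr ?_
    · exact (sel_keys_nodup row _ htmplnd).of_map
    · exact hrownd.filter _
    · intro p
      have hmemtmpl : p.1 ∈ addstep D "_endpoint" ↔ (p.1 ∈ D ∨ p.1 = "_endpoint") := by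
        by_cases hm : "_endpoint" ∈ D
        · simp only [addstep, if_pos hm]
          constructor
          · exact fun h => Or.inl h
          · rintro (h | h)
            · exact h
            · exact h ▸ hm
        · simp [addstep, hm]
      constructor
      · intro hp
        rcases (mem_sel row _ p).mp hp with ⟨hpt, q, hq, hv⟩
        have hqmem : q ∈ row := List.mem_of_find?_eq_some hq
        have hqk : q.1 = p.1 := by simpa using List.find?_some hq
        have hpq : p = q := by
          cases p; cases q
          simp only at hqk hv
          simp [hqk, hv]
        rw [hpq]
        rw [List.mem_filter]
        refine ⟨hqmem, ?_⟩
        rw [ordOf_any]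
        rcases hmemtmpl.mp hpt with h | h
        · simp only [Bool.or_eq_true, List.any_eq_true]
          exact Or.inl ⟨p.1, hpq ▸ h, by simp [hqk]⟩
        · simp only [Bool.or_eq_true, beq_iff_eq]
          exact Or.inr (hqk.trans h)
      · intro hp
        rw [List.mem_filter] at hp
        rcases hp with ⟨hpr, hcond⟩
        rw [ordOf_any] at hcond
        have hpt : p.1 ∈ addstep D "_endpoint" := by
          apply hmemtmpl.mpr
          simp only [Bool.or_eq_true, List.any_eq_true] at hcond
          rcases hcond with ⟨x, hx, hxe⟩ | h
          · exact Or.inl ((beq_iff_eq.mp hxe) ▸ hx)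
          · exact Or.inr (beq_iff_eq.mp h)
        exact (mem_sel row _ p).mpr ⟨hpt, p, find?_of_mem_nodup row p hrow hpr, rfl⟩
  have hpair : (sel row (addstep D "_endpoint")).Pairwise
      (fun p q => pvRank (ordOf D 0) p.1 < pvRank (ordOf D 0) q.1) :=
    sel_pairwise row _ _ (tmpl_pairwise D hD)
  rw [PySem.List.sorted_eq_of_perm_of_pairwise_lt _ _ _ hperm hpair]
  rw [foldl_dinsert _ [] (by intro p _; rfl) (sel_keys_nodup row _ htmplnd)]
  simp

-- ===== VERDICT (by name: the statement is the Claim_ definition above) =====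
theorem apply_select_rows_py_spec : Claim_equal_apply_select_rows_py := by
  intro rows columns _ hpre
  unfold Spec_apply_select_rows_py
  unfold apply_select_rows_py apply_select_rows_py_alt
  have hord : columns.foldl pvBStep [] =
      ordOf ((columns.filter (fun c => c != "")).foldl addstep []) 0 := by
    have := fold_bstep columns []
    rw [show (ordOf [] 0) = ([] : List (String × Nat)) from rfl] at this
    rw [this, fold_vstep_filter]
  set valid := columns.filter (fun c => c != "") with hvalid
  set D := valid.foldl addstep [] with hDdef
  have hDnd : D.Nodup := nodup_fold_add valid [] (by simp)
  by_cases hv : valid = []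
  · have hD : D = [] := by rw [hDdef, hv]; rfl
    have : columns.foldl pvBStep [] = [] := by rw [hord, hD]; rfl
    simp only [hv, this, reduceIte]
  · have hD : D ≠ [] := by
      intro h
      apply hv
      cases hvv : valid with
      | nil => rfl
      | cons c cs =>
        exfalso
        have : c ∈ D := (mem_fold_add valid [] c).mpr (Or.inr (hvv ▸ List.mem_cons_self))
        rw [h] at this
        simp at this
    have hordne : columns.foldl pvBStep [] ≠ [] := by
      rw [hord]
      intro h
      exact hD ((ordOf_eq_nil_iff D).mp h)
    rw [if_neg hv, if_neg hordne]
    apply List.map_congr_left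
    intro row hrowmem
    have hrow := hpre row hrowmem
    have hA : valid.foldl
        (fun acc column => if rcontains row column then dinsert acc column (rget row column) else acc) []
        = sel row D := by
      have := foldA_sel row valid []
      simpa [sel] using this
    rw [hA, hord]
    exact perrow row D hrow hDnd
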